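-- pv_equiv track=rewrite | github.com/pallaire/AdventCode | 2023/13/pointofincidence.py | binaryConversion
-- ===== SOURCE A (Python) =====
-- def binaryConversion(field):
--     colBits = len(field)
--     rowBits = len(field[0])
--
--     cols = [0]*rowBits
--     rows = [0]*colBits
--
--     for y in range(colBits):
--         for x in range(rowBits):
--             bit = 1 if field[y][x] == '#' else 0
--             rows[y] = (rows[y] << 1) + bit
--             cols[x] = (cols[x] << 1) + bit
--
--     return { "cols":cols, "rows":rows }
-- ===== SOURCE B (Python) =====
-- def binaryConversion(field):
--     rowBits = len(field[0])
--
--     rows = []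
--     for row in field:
--         v = 0
--         for x in range(rowBits):
--             v = (v << 1) + (1 if row[x] == '#' else 0)
--         rows.append(v)
--
--     cols = []
--     for x in range(rowBits):
--         v = 0
--         for row in field:
--             v = (v << 1) + (1 if row[x] == '#' else 0)
--         cols.append(v)
--
--     return {"cols": cols, "rows": rows}
-- ===== Notes on version B (the rewrite author's own statement) =====
-- stated objective: simpler
-- what changed: A fills both result arrays in one fused nested loop with in-place index updates (rows[y] and cols[x] mutated together); B computes rows and cols in two independent passes, building each integer locally with a shift accumulator and appending, with no index arithmetic into pre-allocated arrays.
import Mathlib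
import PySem

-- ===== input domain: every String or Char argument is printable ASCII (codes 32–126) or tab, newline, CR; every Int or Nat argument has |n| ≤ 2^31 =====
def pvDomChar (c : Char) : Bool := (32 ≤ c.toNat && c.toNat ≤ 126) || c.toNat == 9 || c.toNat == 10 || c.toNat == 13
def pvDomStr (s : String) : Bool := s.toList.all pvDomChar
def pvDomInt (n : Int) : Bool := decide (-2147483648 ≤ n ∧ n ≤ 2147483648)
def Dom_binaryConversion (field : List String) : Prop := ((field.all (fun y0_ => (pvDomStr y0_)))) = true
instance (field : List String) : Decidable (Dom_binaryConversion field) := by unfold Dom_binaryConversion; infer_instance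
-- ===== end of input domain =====

-- B computes rows and cols in two independent passes with a local shift accumulator,
-- instead of A's fused nested loop mutating both pre-allocated arrays in place (objective: simpler).

-- ===== PORT A =====
-- bit = 1 if field[y][x] == '#' else 0   (index in range under Pre_; out of range defaults, never reached inside Pre_)
def pvBit (s : String) (x : Nat) : Int := if s.toList.getD x ' ' = '#' then 1 else 0

def binaryConversion (field : List String) : List (String × List Int) :=
  let colBits := field.length
  let rowBits := (field.getD 0 "").length   -- len(field[0]); field ≠ [] under Pre_
  let init : List Int × List Int := (List.replicate rowBits (0 : Int), List.replicate colBits (0 : Int))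
  let res := (List.range colBits).foldl (fun cr y =>
      (List.range rowBits).foldl (fun cr x =>
        let bit := pvBit (field.getD y "") x
        (cr.1.set x (2 * cr.1.getD x 0 + bit),   -- cols[x] = (cols[x] << 1) + bit
         cr.2.set y (2 * cr.2.getD y 0 + bit))   -- rows[y] = (rows[y] << 1) + bit
      ) cr) init
  [("cols", res.1), ("rows", res.2)]

-- ===== PORT B =====
def binaryConversion_alt (field : List String) : List (String × List Int) :=
  let rowBits := (field.getD 0 "").length
  let rows := field.foldl (fun acc row =>
      acc ++ [(List.range rowBits).foldl (fun v x => 2 * v + pvBit row x) 0]) []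
  let cols := (List.range rowBits).foldl (fun acc x =>
      acc ++ [field.foldl (fun v row => 2 * v + pvBit row x) 0]) []
  [("cols", cols), ("rows", rows)]

-- ===== PRECONDITION & SPEC =====
-- Pre_ excludes exactly the inputs where Python A raises IndexError: the empty list (field[0])
-- and ragged inputs where some row is shorter than the first row (field[y][x]).
def Pre_binaryConversion (field : List String) : Prop :=
  field ≠ [] ∧ ∀ s ∈ field, (field.getD 0 "").length ≤ s.length
instance (field : List String) : Decidable (Pre_binaryConversion field) := by
  unfold Pre_binaryConversion; infer_instance
def pvWitness_binaryConversion : List String := ["#.", ".#"]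

def Spec_binaryConversion (field : List String) (out : List (String × List Int)) : Prop := out = binaryConversion_alt field
instance (field : List String) (out : List (String × List Int)) : Decidable (Spec_binaryConversion field out) := by unfold Spec_binaryConversion; infer_instance

-- ===== CLAIM (what is proved, stated in full; the proofs are below) =====
def Claim_equal_binaryConversion : Prop := ∀ (field : List String), Dom_binaryConversion field → Pre_binaryConversion field → Spec_binaryConversion field (binaryConversion field)

-- ===== LEMMAS AND PROOFS =====

-- Inner loop, rows side: only index y is touched; it accumulates the shift chain.
theorem pv_rows_inner (b : Nat → Int) (n y : Nat) (rows : List Int) (hy : y < rows.length) :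
    (List.range n).foldl (fun r x => r.set y (2 * r.getD y 0 + b x)) rows
      = rows.set y ((List.range n).foldl (fun v x => 2 * v + b x) (rows.getD y 0)) := by
  induction n with
  | zero => simp [List.getD_eq_getElem?_getD, List.getElem?_eq_getElem hy, List.set_getElem_self]
  | succ n ih =>
    rw [List.range_succ, List.foldl_append, List.foldl_append, ih]
    simp only [List.foldl_cons, List.foldl_nil, List.set_set]
    congr 1
    rw [List.getD_eq_getElem?_getD, List.getElem?_set_self (by simpa using hy)]
    simp

-- Inner loop, cols side: each index < n is updated once, pointwise.
theorem pv_cols_inner (f : Nat → Int → Int) (n : Nat) (cols : List Int) (hn : n ≤ cols.length) :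
    (List.range n).foldl (fun c x => c.set x (f x (c.getD x 0))) cols
      = (List.range cols.length).map
          (fun i => if i < n then f i (cols.getD i 0) else cols.getD i 0) := by
  induction n with
  | zero =>
    simp only [List.range_zero, List.foldl_nil, Nat.not_lt_zero, if_false]
    apply List.ext_getElem
    · simp
    · intro i h1 h2
      simp [List.getD_eq_getElem?_getD, List.getElem?_eq_getElem h1]
  | succ n ih =>
    have hn' : n ≤ cols.length := Nat.le_of_succ_le hn
    rw [List.range_succ, List.foldl_append, ih hn']
    simp only [List.foldl_cons, List.foldl_nil]
    have hlen : ((List.range cols.length).map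
        (fun i => if i < n then f i (cols.getD i 0) else cols.getD i 0)).length = cols.length := by
      simp
    have hgetD : ((List.range cols.length).map
        (fun i => if i < n then f i (cols.getD i 0) else cols.getD i 0)).getD n 0
        = cols.getD n 0 := by
      rw [List.getD_eq_getElem?_getD, List.getElem?_eq_getElem (by omega)]
      simp
    rw [hgetD]
    apply List.ext_getElem
    · simp
    · intro i h1 h2
      by_cases hi : i = n
      · subst hi
        rw [List.getElem_set_self (by simpa using h2)]
        simp
      · rw [List.getElem_set_ne (fun h => hi h.symm)]
        simp only [List.getElem_map, List.getElem_range]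
        rcases Nat.lt_or_ge i n with h | h
        · simp [h, Nat.lt_succ_of_lt h]
        · simp [show ¬ i < n by omega, show ¬ i < n + 1 by omega]

-- (range l.length).map (fun i => g (l.getD i d)) = l.map g
theorem pv_map_range_getD {α β : Type} (l : List α) (d : α) (g : α → β) :
    (List.range l.length).map (fun i => g (l.getD i d)) = l.map g := by
  apply List.ext_getElem
  · simp
  · intro i h1 h2
    simp [List.getD_eq_getElem?_getD, List.getElem?_eq_getElem (by simpa using h1)]

-- folding over indices with getD = folding over the list itself
theorem pv_foldl_range_getD {α β : Type} (l : List α) (d : α) (h : β → α → β) (init : β) :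
    (List.range l.length).foldl (fun v i => h v (l.getD i d)) init = l.foldl h init := by
  induction l generalizing init with
  | nil => simp
  | cons a t ih =>
    rw [List.length_cons, List.range_succ_eq_map]
    simp only [List.foldl_cons, List.foldl_map]
    simpa using ih (h init a)

-- Outer loop, rows side: after k steps the first k entries hold the row values, the rest 0.
theorem pv_rows_outer (field : List String) (rowBits : Nat) (k colBits : Nat) (hk : k ≤ colBits) :
    (List.range k).foldl (fun rows y =>
        (List.range rowBits).foldl
          (fun r x => r.set y (2 * r.getD y 0 + pvBit (field.getD y "") x)) rows)
      (List.replicate colBits (0 : Int))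
    = (List.range colBits).map (fun y =>
        if y < k then (List.range rowBits).foldl (fun v x => 2 * v + pvBit (field.getD y "") x) 0
        else 0) := by
  induction k with
  | zero =>
    simp only [List.range_zero, List.foldl_nil, Nat.not_lt_zero, if_false]
    rw [show List.replicate colBits (0 : Int) = (List.range colBits).map (fun _ => (0 : Int)) by simp]
  | succ k ih =>
    have hk' : k ≤ colBits := Nat.le_of_succ_le hk
    rw [List.range_succ, List.foldl_append, ih hk']
    simp only [List.foldl_cons, List.foldl_nil]
    rw [pv_rows_inner _ _ _ _ (by simp; omega)]
    have hgetD : ((List.range colBits).map (fun y =>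
        if y < k then (List.range rowBits).foldl (fun v x => 2 * v + pvBit (field.getD y "") x) 0
        else 0)).getD k 0 = 0 := by
      rw [List.getD_eq_getElem?_getD, List.getElem?_eq_getElem (by simp; omega)]
      simp
    rw [hgetD]
    apply List.ext_getElem
    · simp
    · intro i h1 h2
      by_cases hi : i = k
      · subst hi
        rw [List.getElem_set_self (by simpa using h2)]
        simp
      · rw [List.getElem_set_ne (fun h => hi h.symm)]
        simp only [List.getElem_map, List.getElem_range]
        rcases Nat.lt_or_ge i k with h | h
        · simp [h, Nat.lt_succ_of_lt h]
        · simp [show ¬ i < k by omega, show ¬ i < k + 1 by omega]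

-- Outer loop, cols side: after k steps each column x holds the fold over the first k rows.
theorem pv_cols_outer (field : List String) (rowBits : Nat) (k : Nat) :
    (List.range k).foldl (fun cols y =>
        (List.range rowBits).foldl
          (fun c x => c.set x (2 * c.getD x 0 + pvBit (field.getD y "") x)) cols)
      (List.replicate rowBits (0 : Int))
    = (List.range rowBits).map (fun x =>
        (List.range k).foldl (fun v y => 2 * v + pvBit (field.getD y "") x) 0) := by
  induction k with
  | zero =>
    simp only [List.range_zero, List.foldl_nil]
    rw [show List.replicate rowBits (0 : Int) = (List.range rowBits).map (fun _ => (0 : Int)) by simp]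
  | succ k ih =>
    rw [List.range_succ, List.foldl_append, ih]
    simp only [List.foldl_cons, List.foldl_nil]
    rw [pv_cols_inner (fun x c => 2 * c + pvBit (field.getD k "") x) rowBits _ (by simp)]
    apply List.ext_getElem
    · simp
    · intro i h1 h2
      simp only [List.length_map, List.length_range] at h1
      have hget : ((List.range rowBits).map (fun x =>
          (List.range k).foldl (fun v y => 2 * v + pvBit (field.getD y "") x) 0)).getD i 0
          = (List.range k).foldl (fun v y => 2 * v + pvBit (field.getD y "") i) 0 := by
        rw [List.getD_eq_getElem?_getD, List.getElem?_eq_getElem (by simpa using h1)]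
        simp
      simp only [List.getElem_map, List.getElem_range, List.length_map, List.length_range] at *
      rw [hget, List.foldl_append]
      simp [h1]

-- ===== VERDICT (by name: the statement is the Claim_ definition above) =====
theorem binaryConversion_spec : Claim_equal_binaryConversion := by
  intro field _hDom _hPre
  unfold Spec_binaryConversion binaryConversion binaryConversion_alt
  simp only []
  -- split the fused loop into two independent loops (two accumulators)
  rw [show (fun (cr : List Int × List Int) (y : Nat) =>
        (List.range (field.getD 0 "").length).foldl (fun cr x =>
          let bit := pvBit (field.getD y "") x
          (cr.1.set x (2 * cr.1.getD x 0 + bit), cr.2.set y (2 * cr.2.getD y 0 + bit))) cr)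
      = (fun (cr : List Int × List Int) (y : Nat) =>
          ((List.range (field.getD 0 "").length).foldl
              (fun c x => c.set x (2 * c.getD x 0 + pvBit (field.getD y "") x)) cr.1,
           (List.range (field.getD 0 "").length).foldl
              (fun r x => r.set y (2 * r.getD y 0 + pvBit (field.getD y "") x)) cr.2))
      from by
        funext cr y
        exact PySem.List.foldl_prod_mk
          (f := fun c x => c.set x (2 * c.getD x 0 + pvBit (field.getD y "") x))
          (g := fun r x => r.set y (2 * r.getD y 0 + pvBit (field.getD y "") x))
          _ cr.1 cr.2]
  rw [PySem.List.foldl_prod_mk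
      (fun c y => (List.range (field.getD 0 "").length).foldl
          (fun c x => c.set x (2 * c.getD x 0 + pvBit (field.getD y "") x)) c)
      (fun r y => (List.range (field.getD 0 "").length).foldl
          (fun r x => r.set y (2 * r.getD y 0 + pvBit (field.getD y "") x)) r)
      (List.range field.length)
      (List.replicate (field.getD 0 "").length (0 : Int))
      (List.replicate field.length (0 : Int))]
  rw [pv_cols_outer field (field.getD 0 "").length field.length,
      pv_rows_outer field (field.getD 0 "").length field.length field.length (Nat.le_refl _)]
  rw [PySem.List.foldl_append_singleton_eq_map, PySem.List.foldl_append_singleton_eq_map]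
  simp only [List.nil_append, List.cons.injEq, Prod.mk.injEq, and_true, true_and]
  constructor
  · -- cols agree
    congr 1
    funext x
    exact pv_foldl_range_getD field "" (fun v row => 2 * v + pvBit row x) 0
  · -- rows agree
    rw [← pv_map_range_getD field ""
        (fun row => (List.range (field.getD 0 "").length).foldl (fun v x => 2 * v + pvBit row x) 0)]
    apply List.map_congr_left
    intro y hy
    simp [List.mem_range.mp hy]
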